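-- pv_equiv track=rewrite | github.com/stammt/advent-of-code | aoc2023/day15.py | myHash
-- ===== SOURCE A (Python) =====
-- def myHash(s):
--     v = 0
--     for c in s:
--         code = ord(c)
--         v += code
--         v *= 17
--         v %= 256
--     return v
-- ===== SOURCE B (Python) =====
-- def myHash(s):
--     # Expanded polynomial form: sum of ord(c) * 17^(n-i) mod 256, reduced once at the end.
--     n = len(s)
--     return sum(ord(c) * pow(17, n - i, 256) for i, c in enumerate(s)) % 256
-- ===== Notes on version B (the rewrite author's own statement) =====
-- stated objective: alternative
-- what changed: Replaces the rolling Horner accumulator (add, multiply by 17, mod each step) by a position-weighted polynomial sum ord(c)*17^(n-i) mod 256 over enumerate(s), reduced modulo 256 once at the end.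
import Mathlib
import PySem

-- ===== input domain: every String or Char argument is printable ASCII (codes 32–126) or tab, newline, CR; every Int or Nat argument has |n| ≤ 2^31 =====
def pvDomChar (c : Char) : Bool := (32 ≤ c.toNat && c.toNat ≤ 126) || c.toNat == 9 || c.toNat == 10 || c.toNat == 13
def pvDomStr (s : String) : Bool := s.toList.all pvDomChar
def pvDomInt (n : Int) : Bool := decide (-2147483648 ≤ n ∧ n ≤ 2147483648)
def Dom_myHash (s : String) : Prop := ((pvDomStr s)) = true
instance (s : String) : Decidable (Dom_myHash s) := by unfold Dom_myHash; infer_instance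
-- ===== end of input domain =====

-- B computes the same hash as an expanded polynomial sum instead of A's rolling Horner accumulator.

-- ===== PORT A =====
-- v = 0; for c in s: v += ord(c); v *= 17; v %= 256
def myHash (s : String) : Int :=
  s.toList.foldl (fun v c => PySem.Int.mod ((v + (c.toNat : Int)) * 17) 256) 0

-- ===== PORT B =====
-- sum(ord(c) * pow(17, n - i, 256) for i, c in enumerate(s)) % 256
-- pow(17, e, 256) (e ≥ 0 here since i < n) ported as 17 ^ e.toNat % 256, the library call's value.
def myHash_alt (s : String) : Int :=
  PySem.Int.mod
    ((PySem.List.enumerate s.toList).foldl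
      (fun acc p => acc + (p.2.toNat : Int) * PySem.Int.mod (17 ^ ((s.toList.length : Int) - p.1).toNat) 256) 0)
    256

-- ===== PRECONDITION & SPEC =====
def Spec_myHash (s : String) (out : Int) : Prop := out = myHash_alt s
instance (s : String) (out : Int) : Decidable (Spec_myHash s out) := by unfold Spec_myHash; infer_instance

-- ===== CLAIM (what is proved, stated in full; the proofs are below) =====
def Claim_equal_myHash : Prop := ∀ (s : String), Dom_myHash s → Spec_myHash s (myHash s)

-- ===== LEMMAS AND PROOFS =====

-- A's Horner fold without the per-step reduction.
def pvH (v : Int) (l : List Char) : Int := l.foldl (fun v c => (v + (c.toNat : Int)) * 17) v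

-- The expanded polynomial sum with exact powers.
def pvS : List Char → Int
  | [] => 0
  | c :: t => (c.toNat : Int) * 17 ^ (t.length + 1) + pvS t

theorem pvH_cong (l : List Char) : ∀ a b : Int, a % 256 = b % 256 → pvH a l % 256 = pvH b l % 256 := by
  induction l with
  | nil => intro a b h; simpa [pvH] using h
  | cons c t ih =>
    intro a b h
    simpa [pvH, List.foldl] using ih _ _ ((Int.ModEq.add_right (c.toNat : Int) h).mul_right 17)

theorem pvH_eq (l : List Char) : ∀ v : Int, pvH v l = v * 17 ^ l.length + pvS l := by
  induction l with
  | nil => intro v; simp [pvH, pvS]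
  | cons c t ih =>
    intro v
    simp only [pvH, List.foldl] at *
    rw [ih]
    simp [pvS, pow_succ]
    ring

theorem myHash_eq_pvH (l : List Char) :
    ∀ v : Int, 0 ≤ v → v < 256 →
      l.foldl (fun v c => PySem.Int.mod ((v + (c.toNat : Int)) * 17) 256) v = pvH v l % 256 := by
  induction l with
  | nil =>
    intro v h0 h1
    simp [pvH, Int.emod_eq_of_lt h0 h1]
  | cons c t ih =>
    intro v h0 h1
    have hm : PySem.Int.mod ((v + (c.toNat : Int)) * 17) 256 = ((v + (c.toNat : Int)) * 17) % 256 :=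
      PySem.Int.mod_eq_emod_of_pos (by norm_num)
    simp only [List.foldl, pvH, hm]
    rw [ih _ (Int.emod_nonneg _ (by norm_num)) (Int.emod_lt_of_pos _ (by norm_num))]
    exact pvH_cong t _ _ (Int.emod_emod_of_dvd _ (by norm_num))

theorem alt_sum (n : Nat) :
    ∀ (t : List Char) (a : Int), t.length ≤ n →
      (PySem.List.enumerate t ((n : Int) - t.length)).foldl
        (fun acc p => acc + (p.2.toNat : Int) * PySem.Int.mod (17 ^ (((n : Int) - p.1).toNat)) 256) a
        % 256 = (a + pvS t) % 256 := by
  intro t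
  induction t with
  | nil => intro a _; simp [PySem.List.enumerate_nil, pvS]
  | cons c t ih =>
    intro a h
    rw [PySem.List.enumerate_cons]
    simp only [List.foldl]
    have hs : (n : Int) - (List.length (c :: t) : Int) + 1 = (n : Int) - t.length := by
      simp [List.length_cons]; ring
    have he : (((n : Int) - ((n : Int) - (List.length (c :: t) : Int))).toNat) = t.length + 1 := by
      omega
    rw [hs, he]
    rw [ih _ (by simpa using Nat.le_of_succ_le (by simpa [List.length_cons] using h))]
    have hmod : PySem.Int.mod (17 ^ (t.length + 1) : Int) 256 = (17 ^ (t.length + 1) : Int) % 256 :=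
      PySem.Int.mod_eq_emod_of_pos (by norm_num)
    rw [hmod]
    have h17 : (17 ^ (t.length + 1) : Int) % 256 ≡ 17 ^ (t.length + 1) [ZMOD 256] :=
      Int.emod_emod_of_dvd _ dvd_rfl
    have hcong := ((h17.mul_left (c.toNat : Int)).add_left a).add_right (pvS t)
    simp only [pvS]
    rw [hcong]
    ring_nf

-- ===== VERDICT (by name: the statement is the Claim_ definition above) =====
theorem myHash_spec : Claim_equal_myHash := by
  intro s _
  unfold Spec_myHash myHash myHash_alt
  rw [myHash_eq_pvH s.toList 0 le_rfl (by norm_num), pvH_eq]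
  have h0 : ((s.toList.length : Int) - (s.toList.length : Int)) = 0 := by ring
  have := alt_sum s.toList.length s.toList 0 le_rfl
  rw [h0] at this
  rw [PySem.Int.mod_eq_emod_of_pos (by norm_num), this]
  ring_nf
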